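-- pv_equiv track=rewrite | github.com/xobkcalb/stuff | python/bubble-babble/bbl.py | babble
-- ===== SOURCE A (Python) =====
-- def transcode(numbers):
--     V = 'aeiouy'
--     C = 'bcdfghklmnprstvzx'
--     result = []
--     for i in range(0, len(numbers), 5):
--         a, b, c, d, e = numbers[i:i+5]
--         result.append(C[a] + V[b] + C[c] + V[d] + C[e])
--     return '-'.join(result)
--
-- def babble(numbers):
--     result = [16]
--     seed = 1
--     i = 0
--     while True:
--         if i >= len(numbers):
--             result.extend([
--                 seed % 6,
--                 16,
--                 seed // 6,
--             ])
--             break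
--
--         byte1 = numbers[i]
--         result.extend([
--             (((byte1 >> 6) & 3) + seed) % 6,
--             (byte1 >> 2) & 15,
--             ((byte1 & 3) + (seed // 6)) % 6,
--         ])
--
--         if i+1 >= len(numbers):
--             break
--
--         byte2 = numbers[i+1]
--         result.extend([
--             (byte2 >> 4) & 15,
--             byte2 & 15
--         ])
--
--         seed = (seed * 5 + byte1 * 7 + byte2) % 36
--         i += 2
--     result.append(16)
--     return transcode(result)
-- ===== SOURCE B (Python) =====
-- def babble(numbers):
--     V = 'aeiouy'
--     C = 'bcdfghklmnprstvzx'
--     tiles = []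
--     seed = 1
--     carry = 16
--     n = len(numbers)
--     i = 0
--     while i + 1 < n:
--         b1, b2 = numbers[i], numbers[i + 1]
--         tiles.append(C[carry]
--                      + V[(((b1 >> 6) & 3) + seed) % 6]
--                      + C[(b1 >> 2) & 15]
--                      + V[((b1 & 3) + seed // 6) % 6]
--                      + C[(b2 >> 4) & 15])
--         carry = b2 & 15
--         seed = (seed * 5 + b1 * 7 + b2) % 36
--         i += 2
--     if i < n:
--         b1 = numbers[i]
--         tiles.append(C[carry]
--                      + V[(((b1 >> 6) & 3) + seed) % 6]
--                      + C[(b1 >> 2) & 15]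
--                      + V[((b1 & 3) + seed // 6) % 6]
--                      + C[16])
--     else:
--         tiles.append(C[carry] + V[seed % 6] + C[16] + V[seed // 6] + C[16])
--     return '-'.join(tiles)
-- ===== Notes on version B (the rewrite author's own statement) =====
-- stated objective: alternative
-- what changed: B fuses the babble loop and the transcode pass into a single pass over byte pairs that emits each five-character tile directly with a carried fifth value, eliminating the intermediate number list and the separate chunk-of-five pass.
import Mathlib
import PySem

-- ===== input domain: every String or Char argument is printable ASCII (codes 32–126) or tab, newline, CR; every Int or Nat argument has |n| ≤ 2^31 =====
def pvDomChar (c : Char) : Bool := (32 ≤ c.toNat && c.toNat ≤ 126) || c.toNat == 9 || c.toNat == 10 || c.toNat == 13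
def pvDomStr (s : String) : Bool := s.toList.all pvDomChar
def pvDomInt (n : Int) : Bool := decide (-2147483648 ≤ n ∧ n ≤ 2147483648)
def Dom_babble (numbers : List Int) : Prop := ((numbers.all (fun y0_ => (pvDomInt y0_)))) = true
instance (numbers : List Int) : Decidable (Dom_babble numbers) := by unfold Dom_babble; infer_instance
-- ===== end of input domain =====

-- B fuses babble and transcode into one pass over byte pairs, emitting each tile directly (no intermediate number list): different decomposition, same cost.


-- ===== PORT A =====
-- shared table constants (transliterations of V and C from the Python)
def bblV : List Char := ['a','e','i','o','u','y']
def bblC : List Char := ['b','c','d','f','g','h','k','l','m','n','p','r','s','t','v','z','x']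

-- s[i]: every call site below passes an in-range index (Python would raise otherwise; never reached)
def bblIdx (s : List Char) (i : Int) : List Char :=
  match PySem.List.pyGet? s i with
  | some c => [c]
  | none => []

-- helper 'transcode': the for-loop over chunks of five as structural recursion
def transcodeLoop : List Int → List String
  | a :: b :: c :: d :: e :: rest =>
      String.ofList (bblIdx bblC a ++ bblIdx bblV b ++ bblIdx bblC c ++ bblIdx bblV d ++ bblIdx bblC e)
        :: transcodeLoop rest
  | _ => []   -- a chunk shorter than 5 would raise in Python; babble always passes a multiple of 5

def transcode (nums : List Int) : String := PySem.Str.join "-" (transcodeLoop nums)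

-- the while-loop of A: consumes two numbers at a time, keeps seed; returns the numbers it extends result with
def babbleLoop : List Int → Int → List Int
  | [], seed => [PySem.Int.mod seed 6, 16, PySem.Int.floordiv seed 6]
  | [b1], seed =>
      [PySem.Int.mod (PySem.Int.band (b1 >>> (6:Nat)) 3 + seed) 6,
       PySem.Int.band (b1 >>> (2:Nat)) 15,
       PySem.Int.mod (PySem.Int.band b1 3 + PySem.Int.floordiv seed 6) 6]
  | b1 :: b2 :: rest, seed =>
      [PySem.Int.mod (PySem.Int.band (b1 >>> (6:Nat)) 3 + seed) 6,
       PySem.Int.band (b1 >>> (2:Nat)) 15,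
       PySem.Int.mod (PySem.Int.band b1 3 + PySem.Int.floordiv seed 6) 6,
       PySem.Int.band (b2 >>> (4:Nat)) 15,
       PySem.Int.band b2 15]
      ++ babbleLoop rest (PySem.Int.mod (seed * 5 + b1 * 7 + b2) 36)

def babble (numbers : List Int) : String :=
  transcode (16 :: (babbleLoop numbers 1 ++ [16]))

-- ===== PORT B =====
-- B: one pass, two bytes per step, emitting each five-character tile directly (no intermediate number list)
def babbleAltLoop : List Int → Int → Int → List String
  | b1 :: b2 :: rest, seed, carry =>
      String.ofList (bblIdx bblC carry
        ++ bblIdx bblV (PySem.Int.mod (PySem.Int.band (b1 >>> (6:Nat)) 3 + seed) 6)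
        ++ bblIdx bblC (PySem.Int.band (b1 >>> (2:Nat)) 15)
        ++ bblIdx bblV (PySem.Int.mod (PySem.Int.band b1 3 + PySem.Int.floordiv seed 6) 6)
        ++ bblIdx bblC (PySem.Int.band (b2 >>> (4:Nat)) 15))
      :: babbleAltLoop rest (PySem.Int.mod (seed * 5 + b1 * 7 + b2) 36) (PySem.Int.band b2 15)
  | [b1], seed, carry =>
      [String.ofList (bblIdx bblC carry
        ++ bblIdx bblV (PySem.Int.mod (PySem.Int.band (b1 >>> (6:Nat)) 3 + seed) 6)
        ++ bblIdx bblC (PySem.Int.band (b1 >>> (2:Nat)) 15)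
        ++ bblIdx bblV (PySem.Int.mod (PySem.Int.band b1 3 + PySem.Int.floordiv seed 6) 6)
        ++ bblIdx bblC 16)]
  | [], seed, carry =>
      [String.ofList (bblIdx bblC carry
        ++ bblIdx bblV (PySem.Int.mod seed 6)
        ++ bblIdx bblC 16
        ++ bblIdx bblV (PySem.Int.floordiv seed 6)
        ++ bblIdx bblC 16)]

def babble_alt (numbers : List Int) : String :=
  PySem.Str.join "-" (babbleAltLoop numbers 1 16)

-- ===== PRECONDITION & SPEC =====
def Spec_babble (numbers : List Int) (out : String) : Prop := out = babble_alt numbers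
instance (numbers : List Int) (out : String) : Decidable (Spec_babble numbers out) := by unfold Spec_babble; infer_instance

-- ===== CLAIM (what is proved, stated in full; the proofs are below) =====
def Claim_equal_babble : Prop := ∀ (numbers : List Int), Dom_babble numbers → Spec_babble numbers (babble numbers)

-- ===== LEMMAS AND PROOFS =====
-- Each of B's tiles is one five-chunk of A's number list, shifted by the carried fifth value.
theorem transcodeLoop_eq (rest : List Int) (seed carry : Int) :
    transcodeLoop (carry :: (babbleLoop rest seed ++ [16])) = babbleAltLoop rest seed carry := by
  induction rest, seed, carry using babbleAltLoop.induct with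
  | case1 b1 b2 rest seed carry ih =>
      simp only [babbleLoop, babbleAltLoop, List.cons_append, List.append_assoc, transcodeLoop]
      exact congrArg _ ih
  | case2 b1 seed carry =>
      simp [babbleLoop, babbleAltLoop, transcodeLoop]
  | case3 seed carry =>
      simp [babbleLoop, babbleAltLoop, transcodeLoop]

-- ===== VERDICT (by name: the statement is the Claim_ definition above) =====
theorem babble_spec : Claim_equal_babble := by
  intro numbers _
  show babble numbers = babble_alt numbers
  unfold babble babble_alt transcode
  rw [transcodeLoop_eq]
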